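-- pv_equiv track=rewrite | github.com/inon-peled/advent_of_code | y2015/d15/part2.py | solve
-- ===== SOURCE A (Python) =====
-- def split(n, k):
--     if k == 1:
--         yield (n,)
--     else:
--         for x in range(n + 1):
--             for rest in split(n - x, k - 1):
--                 yield (x,) + rest
--
-- def _calc_one_combination(data, amounts):
--     total_calories = 0
--
--     num_props = len(data[0]) - 2  # Without name and calories
--     totals = [0] * num_props
--     ingredients = [d[1:-1] for d in data]
--
--     for i in range(len(ingredients)):
--         total_calories += data[i][-1] * amounts[i]
--         for k in range(num_props):
--             totals[k] += ingredients[i][k] * amounts[i]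
--
--     if any(t < 0 for t in totals):
--         return 0, totals
--     value = 1
--     for total in totals:
--         value *= total
--     return value, total_calories
--
-- def solve(data, teaspoons, max_calories):
--     num_ingredients = len(data)
--     best_value = 0
--     for s in split(teaspoons, num_ingredients):
--         curr_value, curr_calories = _calc_one_combination(data, s)
--         if (best_value < curr_value) and (curr_calories == max_calories):
--             best_value = curr_value
--     return best_value
-- ===== SOURCE B (Python) =====
-- def dfs(max_calories, ing, remaining, totals, calories, best):
--     if not ing:
--         if calories == max_calories and all(t >= 0 for t in totals):
--             v = 1
--             for t in totals:
--                 v *= t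
--             if best < v:
--                 return v
--         return best
--     (p, c), rest = ing[0], ing[1:]
--     if not rest:
--         return dfs(max_calories, [], 0,
--                    [t + remaining * q for t, q in zip(totals, p)],
--                    calories + remaining * c, best)
--     for a in range(remaining + 1):
--         best = dfs(max_calories, rest, remaining - a,
--                    [t + a * q for t, q in zip(totals, p)],
--                    calories + a * c, best)
--     return best
--
-- def solve(data, teaspoons, max_calories):
--     num_props = len(data[0]) - 2
--     ing = [(d[1:-1], d[-1]) for d in data]
--     return dfs(max_calories, ing, teaspoons, [0] * num_props, 0, 0)
-- ===== Notes on version B (the rewrite author's own statement) =====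
-- stated objective: alternative
-- what changed: Instead of generating every full composition with a recursive generator and re-scoring each from scratch with _calc_one_combination's indexed double loop, B runs one recursive dfs over the ingredient list that threads the partial property totals and calorie sum down the recursion and folds the running best through it.
-- outside the precondition, e.g. on solve([[1, 2, 3], []], -1, 0): A returns 0, B raises IndexError; on solve([[1, 2, 3], [1]], -1, 0): A returns 0, B returns 0
import Mathlib
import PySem

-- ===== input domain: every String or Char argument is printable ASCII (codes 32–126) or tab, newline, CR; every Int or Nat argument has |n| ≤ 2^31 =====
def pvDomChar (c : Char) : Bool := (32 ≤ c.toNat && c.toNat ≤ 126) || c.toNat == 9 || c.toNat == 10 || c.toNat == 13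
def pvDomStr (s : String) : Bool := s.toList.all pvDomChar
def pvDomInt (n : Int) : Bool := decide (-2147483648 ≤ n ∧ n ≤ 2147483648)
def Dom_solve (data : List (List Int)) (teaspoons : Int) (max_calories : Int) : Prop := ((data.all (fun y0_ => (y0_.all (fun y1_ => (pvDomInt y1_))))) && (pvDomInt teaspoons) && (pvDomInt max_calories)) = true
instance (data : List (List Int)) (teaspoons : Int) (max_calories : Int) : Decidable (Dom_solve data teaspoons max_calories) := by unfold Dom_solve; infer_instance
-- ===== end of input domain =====

-- B replaces A's generate-all-compositions-then-rescore-each scheme by a single recursion over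
-- the ingredient list that threads partial property totals, calories and the running best
-- (objective: alternative decomposition, not claimed faster).

-- ===== PORT A =====

-- generator split(n, k) as the list of tuples it yields (k = 0 never occurs under Pre_;
-- Python recurses unboundedly there, we return [])
def splitA : Int → Nat → List (List Int)
  | _, 0 => []
  | n, 1 => [[n]]
  | n, k + 2 =>
      (PySem.List.pyRange 0 (n + 1) 1).flatMap
        (fun x => (splitA (n - x) (k + 1)).map (fun rest => x :: rest))

-- _calc_one_combination; in the negative-totals branch Python returns the LIST totals as the
-- second component, which solve never compares (its `and` short-circuits on 0 < 0); we model
-- that non-int second component as `none`.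
def calcA (data : List (List Int)) (amounts : List Int) : Int × Option Int :=
  let numProps : Nat := (data.headD []).length - 2
  let ingredients : List (List Int) := data.map (fun d => PySem.List.slice d (some 1) (some (-1)))
  let st :=
    (List.range ingredients.length).foldl
      (fun (st : Int × List Int) i =>
        ( st.1 + ((PySem.List.pyGet? (data[i]?.getD []) (-1)).getD 0) * (amounts[i]?.getD 0),
          (List.range numProps).foldl
            (fun t k => t.set k (t.getD k 0 + ((ingredients[i]?.getD []).getD k 0) * (amounts[i]?.getD 0)))
            st.2 ))
      (0, List.replicate numProps 0)
  if st.2.any (fun t => t < 0) then (0, none)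
  else (st.2.foldl (fun v t => v * t) 1, some st.1)

def solve (data : List (List Int)) (teaspoons : Int) (max_calories : Int) : Int :=
  (splitA teaspoons data.length).foldl
    (fun best s =>
      let r := calcA data s
      if best < r.1 ∧ r.2 = some max_calories then r.1 else best)
    0

-- ===== PORT B =====

-- [t + a * q for t, q in zip(totals, p)]
def zipAddB (t : List Int) (a : Int) (p : List Int) : List Int :=
  (t.zip p).map (fun q => q.1 + a * q.2)

-- dfs(max_calories, ing, remaining, totals, calories, best)
def dfsB (maxC : Int) : List (List Int × Int) → Int → List Int → Int → Int → Int
  | [], _, totals, calories, best =>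
      if calories = maxC ∧ totals.all (fun t => 0 ≤ t) then
        let v := totals.foldl (fun v t => v * t) 1
        if best < v then v else best
      else best
  | [(p, c)], remaining, totals, calories, best =>
      dfsB maxC [] 0 (zipAddB totals remaining p) (calories + remaining * c) best
  | (p, c) :: rest, remaining, totals, calories, best =>
      (PySem.List.pyRange 0 (remaining + 1) 1).foldl
        (fun b a => dfsB maxC rest (remaining - a) (zipAddB totals a p) (calories + a * c) b)
        best

def solve_alt (data : List (List Int)) (teaspoons : Int) (max_calories : Int) : Int :=
  let numProps : Nat := (data.headD []).length - 2
  let ing : List (List Int × Int) :=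
    data.map (fun d => (PySem.List.slice d (some 1) (some (-1)), (PySem.List.pyGet? d (-1)).getD 0))
  dfsB max_calories ing teaspoons (List.replicate numProps 0) 0 0

-- ===== PRECONDITION & SPEC =====

-- Pre_ excludes empty data (A's generator recurses unboundedly, B raises IndexError) and data
-- containing an empty row or a row shorter than the first row when that one has > 2 entries:
-- on such rows A raises IndexError for every nonnegative teaspoons, except that a negative
-- teaspoons with ≥ 2 ingredients empties the combination loop so the bad row is never inspected
-- and A returns 0 — there B raises IndexError on an empty row (it preprocesses all rows up
-- front) and happens to also return 0 on a merely short row, which Pre_ excludes all the same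
-- because that agreement is accidental and not claimed.
def Pre_solve (data : List (List Int)) (teaspoons : Int) (max_calories : Int) : Prop :=
  data ≠ [] ∧ ∀ d ∈ data, d ≠ [] ∧ ((data.headD []).length ≤ 2 ∨ (data.headD []).length ≤ d.length)

instance (data : List (List Int)) (teaspoons : Int) (max_calories : Int) : Decidable (Pre_solve data teaspoons max_calories) := by unfold Pre_solve; infer_instance

def pvWitness_solve : List (List Int) × Int × Int := ([[1, 2, 3], [1, 1, 2]], 2, 8)

def Spec_solve (data : List (List Int)) (teaspoons : Int) (max_calories : Int) (out : Int) : Prop := out = solve_alt data teaspoons max_calories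
instance (data : List (List Int)) (teaspoons : Int) (max_calories : Int) (out : Int) : Decidable (Spec_solve data teaspoons max_calories out) := by unfold Spec_solve; infer_instance

-- ===== CLAIM (what is proved, stated in full; the proofs are below) =====
def Claim_equal_solve : Prop := ∀ (data : List (List Int)) (teaspoons : Int) (max_calories : Int), Dom_solve data teaspoons max_calories → Pre_solve data teaspoons max_calories → Spec_solve data teaspoons max_calories (solve data teaspoons max_calories)

-- ===== LEMMAS AND PROOFS =====

-- accumulate one full composition s over the ingredient list (proof-side model of both loops)
def accum : List (List Int × Int) → List Int → List Int → Int → List Int × Int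
  | [], _, t, cal => (t, cal)
  | _ :: _, [], t, cal => (t, cal)
  | (p, c) :: rest, a :: s, t, cal => accum rest s (zipAddB t a p) (cal + a * c)

-- the base test of dfsB as a function
def finishB (maxC : Int) (t : List Int) (cal : Int) (best : Int) : Int :=
  if cal = maxC ∧ t.all (fun x => 0 ≤ x) then
    let v := t.foldl (fun v x => v * x) 1
    if best < v then v else best
  else best

-- dfsB is the fold of finishB ∘ accum over all compositions
theorem dfsB_eq_foldl (maxC : Int) (ing : List (List Int × Int)) (hing : ing ≠ []) :
    ∀ (remaining : Int) (t : List Int) (cal best : Int),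
      dfsB maxC ing remaining t cal best =
        (splitA remaining ing.length).foldl
          (fun b s => finishB maxC (accum ing s t cal).1 (accum ing s t cal).2 b) best := by
  induction ing with
  | nil => exact absurd rfl hing
  | cons pc rest ih =>
      obtain ⟨p, c⟩ := pc
      cases rest with
      | nil =>
          intro r t cal best
          simp [dfsB, splitA, accum, finishB]
      | cons q rs =>
          intro r t cal best
          have ih' := ih (by simp)
          show dfsB maxC ((p, c) :: q :: rs) r t cal best = _
          rw [dfsB]
          · have hlen : ((p, c) :: q :: rs).length = rs.length + 2 := by simp
            rw [hlen, splitA, List.foldl_flatMap]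
            refine PySem.List.foldl_congr_mem _ _ _ _ (fun b x hx => ?_)
            rw [List.foldl_map, ih' (r - x) (zipAddB t x p) (cal + x * c) b]
            have h2 : (q :: rs).length = rs.length + 1 := by simp
            rw [h2]
            rfl
          · intro h; simp at h

-- every composition has length k
theorem splitA_length (n : Int) (k : Nat) : ∀ s ∈ splitA n k, s.length = k := by
  induction n, k using splitA.induct with
  | case1 n => simp [splitA]
  | case2 n => simp [splitA]
  | case3 n k ih =>
      intro s hs
      simp only [splitA, List.mem_flatMap, List.mem_map] at hs
      obtain ⟨x, _, r, hr, rfl⟩ := hs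
      simp [ih x _ hr]

-- the first m entries after the indexed set-loop
theorem setLoop_aux (f : Nat → Int) : ∀ (m : Nat) (t : List Int), m ≤ t.length →
    (List.range m).foldl (fun t k => t.set k (t.getD k 0 + f k)) t
      = t.mapIdx (fun k x => if k < m then x + f k else x)
  | 0, t, _ => by
      simp only [List.range_zero, List.foldl_nil, Nat.not_lt_zero, if_false]
      apply List.ext_getElem <;> simp
  | (m+1), t, h => by
      have hm : m < t.length := by omega
      rw [List.range_succ, List.foldl_append, setLoop_aux f m t (by omega)]
      simp only [List.foldl_cons, List.foldl_nil]
      have hged : (t.mapIdx (fun k x => if k < m then x + f k else x)).getD m 0 = t[m] := by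
        rw [List.getD_eq_getElem?_getD,
            List.getElem?_eq_getElem (by simpa using hm)]
        simp [List.getElem_mapIdx]
      rw [hged]
      apply List.ext_getElem
      · simp
      · intro i h1 h2
        simp only [List.getElem_set, List.getElem_mapIdx]
        by_cases hmi : m = i
        · subst hmi; simp
        · simp only [if_neg hmi]
          by_cases hi : i < m
          · simp [hi, show i < m + 1 by omega]
          · simp [hi, show ¬ i < m + 1 by omega]

-- the indexed set-loop is zipAddB
theorem setLoop_eq_zipAddB (a : Int) (p t : List Int) (h : t.length ≤ p.length) :
    (List.range t.length).foldl (fun t k => t.set k (t.getD k 0 + (p.getD k 0) * a)) t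
      = zipAddB t a p := by
  rw [setLoop_aux (fun k => p.getD k 0 * a) t.length t le_rfl]
  apply List.ext_getElem
  · simp [zipAddB]; omega
  · intro i h1 h2
    have hit : i < t.length := by simpa using h1
    have hip : i < p.length := by omega
    simp only [zipAddB, List.getElem_mapIdx, List.getElem_map, List.getElem_zip]
    simp [hit, List.getD_eq_getElem?_getD, List.getElem?_eq_getElem hip]
    ring

-- an indexed fold over two parallel lists is the fold over their zip
theorem foldl_range_two {σ : Type} (g : σ → List Int → Int → σ) :
    ∀ (data : List (List Int)) (s : List Int), s.length = data.length → ∀ (init : σ),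
      (List.range data.length).foldl (fun st i => g st (data[i]?.getD []) (s[i]?.getD 0)) init
        = (data.zip s).foldl (fun st q => g st q.1 q.2) init := by
  intro data
  induction data with
  | nil => intro s _ init; simp
  | cons d ds ih =>
      intro s hs init
      cases s with
      | nil => simp at hs
      | cons a s' =>
          rw [List.length_cons, List.range_succ_eq_map, List.foldl_cons, List.foldl_map]
          simp only [List.getElem?_cons_zero, Option.getD_some, Nat.succ_eq_add_one,
            List.getElem?_cons_succ, List.zip_cons_cons, List.foldl_cons]
          exact ih s' (by simpa using hs) (g init d a)

-- the zipped fold is accum (with swapped components)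
theorem zipfold_eq_accum (numProps : Nat) :
    ∀ (data : List (List Int)) (s t : List Int) (cal : Int),
      t.length = numProps →
      (∀ d ∈ data, numProps ≤ (PySem.List.slice d (some 1) (some (-1))).length ∨ numProps = 0) →
      (data.zip s).foldl
        (fun (st : Int × List Int) q =>
          (st.1 + ((PySem.List.pyGet? q.1 (-1)).getD 0) * q.2,
           (List.range numProps).foldl
             (fun t k => t.set k (t.getD k 0 + ((PySem.List.slice q.1 (some 1) (some (-1))).getD k 0) * q.2)) st.2))
        (cal, t)
      = ((accum (data.map (fun d => (PySem.List.slice d (some 1) (some (-1)), (PySem.List.pyGet? d (-1)).getD 0))) s t cal).2,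
         (accum (data.map (fun d => (PySem.List.slice d (some 1) (some (-1)), (PySem.List.pyGet? d (-1)).getD 0))) s t cal).1) := by
  intro data
  induction data with
  | nil => intro s t cal _ _; simp [accum]
  | cons d ds ih =>
      intro s t cal ht hrows
      cases s with
      | nil => simp [accum]
      | cons a s' =>
          have hd := hrows d (by simp)
          have hle : t.length ≤ (PySem.List.slice d (some 1) (some (-1))).length := by
            rcases hd with h | h <;> omega
          rw [List.zip_cons_cons, List.foldl_cons]
          have hinner :
              (List.range numProps).foldl
                (fun t k => t.set k (t.getD k 0 + ((PySem.List.slice d (some 1) (some (-1))).getD k 0) * a)) t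
              = zipAddB t a (PySem.List.slice d (some 1) (some (-1))) := by
            rw [← ht]; exact setLoop_eq_zipAddB a _ t hle
          rw [hinner]
          have hcal : cal + ((PySem.List.pyGet? d (-1)).getD 0) * a
              = cal + a * ((PySem.List.pyGet? d (-1)).getD 0) := by ring
          rw [hcal]
          have ht' : (zipAddB t a (PySem.List.slice d (some 1) (some (-1)))).length = numProps := by
            simp only [zipAddB, List.length_map, List.length_zip]
            omega
          rw [ih s' _ _ ht' (fun d' hd' => hrows d' (by simp [hd']))]
          simp [accum]

-- calcA's loop state equals accum (swapped), under the row-shape precondition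
theorem calcA_eq_accum (data : List (List Int)) (s : List Int)
    (hlen : s.length = data.length)
    (hrows : ∀ d ∈ data, d ≠ [] ∧ ((data.headD []).length ≤ 2 ∨ (data.headD []).length ≤ d.length)) :
    calcA data s =
      (let tc := accum (data.map (fun d => (PySem.List.slice d (some 1) (some (-1)), (PySem.List.pyGet? d (-1)).getD 0))) s
                 (List.replicate ((data.headD []).length - 2) 0) 0
       if tc.1.any (fun t => t < 0) then (0, none)
       else (tc.1.foldl (fun v t => v * t) 1, some tc.2)) := by
  have hempty : PySem.List.slice ([] : List Int) (some 1) (some (-1)) = [] := by decide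
  have hing : ∀ i : Nat,
      ((data.map (fun d => PySem.List.slice d (some 1) (some (-1))))[i]?.getD ([] : List Int))
        = PySem.List.slice (data[i]?.getD []) (some 1) (some (-1)) := by
    intro i
    rw [List.getElem?_map]
    cases data[i]? <;> simp [hempty]
  have hshape : ∀ d ∈ data,
      (data.headD []).length - 2 ≤ (PySem.List.slice d (some 1) (some (-1))).length
        ∨ (data.headD []).length - 2 = 0 := by
    intro d hd
    rcases hrows d hd with ⟨-, h2 | h2⟩
    · right; omega
    · left
      rw [PySem.List.length_slice, PySem.List.clampIdx_neg_one]
      have h1 := PySem.List.clampIdx_natCast d.length 1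
      push_cast at h1
      omega
  unfold calcA
  simp only [List.length_map, hing]
  have key := foldl_range_two
        (fun st d a =>
          (st.1 + ((PySem.List.pyGet? d (-1)).getD 0) * a,
           (List.range ((data.headD []).length - 2)).foldl
             (fun t k => t.set k (t.getD k 0 + ((PySem.List.slice d (some 1) (some (-1))).getD k 0) * a)) st.2))
        data s hlen ((0 : Int), List.replicate ((data.headD []).length - 2) (0 : Int))
  simp only [] at key
  rw [key]
  rw [zipfold_eq_accum ((data.headD []).length - 2) data s (List.replicate ((data.headD []).length - 2) 0) 0
        (by simp) hshape]

-- fold congruence threading an invariant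
theorem foldl_congr_inv {α : Type} (P : Int → Prop) (f g : Int → α → Int) (l : List α)
    (b : Int) (hb : P b)
    (h : ∀ b a, a ∈ l → P b → f b a = g b a ∧ P (f b a)) :
    l.foldl f b = l.foldl g b := by
  induction l generalizing b with
  | nil => rfl
  | cons x xs ih =>
      obtain ⟨he, hp⟩ := h b x (by simp) hb
      simp only [List.foldl_cons, he]
      exact ih _ (he ▸ hp) (fun b a ha hPb => h b a (by simp [ha]) hPb)

-- ===== VERDICT (by name: the statement is the Claim_ definition above) =====
theorem solve_spec : Claim_equal_solve := by
  intro data teaspoons max_calories _hdom hpre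
  obtain ⟨hne, hrows⟩ := hpre
  unfold Spec_solve solve solve_alt
  have hingne : data.map (fun d => (PySem.List.slice d (some 1) (some (-1)), (PySem.List.pyGet? d (-1)).getD 0)) ≠ [] := by
    simpa using hne
  rw [dfsB_eq_foldl max_calories _ hingne]
  simp only [List.length_map]
  apply foldl_congr_inv (fun b => 0 ≤ b) _ _ _ 0 le_rfl
  intro b s hs hb
  have hlen := splitA_length teaspoons data.length s hs
  simp only [calcA_eq_accum data s hlen hrows]
  set tc := accum (data.map fun d => (PySem.List.slice d (some 1) (some (-1)), (PySem.List.pyGet? d (-1)).getD 0)) s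
      (List.replicate ((data.headD []).length - 2) 0) 0 with htc
  by_cases hneg : tc.1.any (fun t => decide (t < 0)) = true
  · have hall : tc.1.all (fun x => decide (0 ≤ x)) = false := by
      rcases List.any_eq_true.mp hneg with ⟨x, hx, hxlt⟩
      simp only [decide_eq_true_eq] at hxlt
      by_contra h
      rw [Bool.not_eq_false, List.all_eq_true] at h
      have := h x hx
      simp only [decide_eq_true_eq] at this
      omega
    refine ⟨?_, ?_⟩
    · simp [hneg, finishB, hall]
    · simpa [hneg] using hb
  · have hall : tc.1.all (fun x => decide (0 ≤ x)) = true := by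
      rw [List.all_eq_true]
      intro x hx
      simp only [decide_eq_true_eq]
      by_contra hc
      exact hneg (List.any_eq_true.mpr ⟨x, hx, by simp; omega⟩)
    refine ⟨?_, ?_⟩
    · simp only [hneg, finishB, hall, if_false, Bool.false_eq_true, and_true, Option.some.injEq]
      split_ifs <;> first | rfl | omega
    · simp only [hneg, Bool.false_eq_true, if_false]
      split_ifs with h
      · omega
      · exact hb
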